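-- pv_equiv track=rewrite | github.com/liupengsay/PyIsTheBestLang | source/search/dfs/template.py | gen_bfs_order_iteration
-- ===== SOURCE A (Python) =====
-- def gen_bfs_order_iteration(dct, root=0):
--     # 模板：生成深搜序即 dfs 序以及对应子树编号区间
--     n = len(dct)
--     for i in range(n):
--         dct[i].sort(reverse=True)  # 按照子节点编号从小到大进行遍历
--     order = 0
--     start = [-1] * n  # 每个原始节点的dfs序号开始点也是node_to_order
--     end = [-1] * n  # 每个原始节点的dfs序号结束点
--     parent = [-1] * n  # 每个原始节点的父节点
--     stack = [[root, -1]]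
--     depth = [0] * n  # 每个原始节点的深度
--     order_to_node = [-1] * n  # 每个dfs序号对应的原始节点编号
--     while stack:
--         i, fa = stack.pop()
--         if i >= 0:
--             start[i] = order
--             order_to_node[order] = i
--             end[i] = order
--             order += 1
--             stack.append([~i, fa])
--             for j in dct[i]:
--                 if j != fa:  # 注意访问顺序可以进行调整，比如字典序正序逆序
--                     parent[j] = i
--                     depth[j] = depth[i] + 1
--                     stack.append([j, i])
--         else:
--             i = ~i
--             if parent[i] != -1:
--                 end[parent[i]] = end[i]
--
--     return start, end
-- ===== SOURCE B (Python) =====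
-- def gen_bfs_order_iteration(dct, root=0):
--     # Staged decomposition: phase 1 runs the same iterative DFS (after the same
--     # in-place reverse sort of dct) but only records the enter/exit event trace;
--     # phase 2 replays the trace, assigning start[u] at enter events and
--     # end[u] = cnt - 1 at exit events.  No parent/depth/order_to_node arrays and
--     # no upward end[parent] = end[child] propagation are needed.
--     n = len(dct)
--     for i in range(n):
--         dct[i].sort(reverse=True)
--     # phase 1: the event trace (e >= 0 means "enter e", e < 0 means "exit -e-1")
--     trace = []
--     frames = [(root, -1)]
--     while frames:
--         u, p = frames.pop()
--         trace.append(u)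
--         if u < 0:
--             continue
--         frames.append((-u - 1, p))
--         for w in dct[u]:
--             if w == p:
--                 continue
--             frames.append((w, u))
--     # phase 2: replay the trace to derive the interval arrays
--     start = [-1] * n
--     end = [-1] * n
--     cnt = 0
--     for e in trace:
--         if e < 0:
--             end[-e - 1] = cnt - 1
--         else:
--             start[e] = cnt
--             cnt += 1
--     return start, end
-- ===== Notes on version B (the rewrite author's own statement) =====
-- stated objective: alternative
-- what changed: B splits the work into two stages: a first pass runs the DFS recording only the enter/exit event trace, and a second pass replays the trace assigning start[i] at enter events and end[i]=order-1 at exit events, eliminating A's parent/depth/order_to_node arrays and its upward end[parent]=end[child] propagation.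
-- outside the precondition, e.g. on gen_bfs_order_iteration([[0], [2], [0]], 2): A returns ([2, -1, 0], [2, -1, 0]), B returns ([2, -1, 0], [2, -1, 2])
import Mathlib
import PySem

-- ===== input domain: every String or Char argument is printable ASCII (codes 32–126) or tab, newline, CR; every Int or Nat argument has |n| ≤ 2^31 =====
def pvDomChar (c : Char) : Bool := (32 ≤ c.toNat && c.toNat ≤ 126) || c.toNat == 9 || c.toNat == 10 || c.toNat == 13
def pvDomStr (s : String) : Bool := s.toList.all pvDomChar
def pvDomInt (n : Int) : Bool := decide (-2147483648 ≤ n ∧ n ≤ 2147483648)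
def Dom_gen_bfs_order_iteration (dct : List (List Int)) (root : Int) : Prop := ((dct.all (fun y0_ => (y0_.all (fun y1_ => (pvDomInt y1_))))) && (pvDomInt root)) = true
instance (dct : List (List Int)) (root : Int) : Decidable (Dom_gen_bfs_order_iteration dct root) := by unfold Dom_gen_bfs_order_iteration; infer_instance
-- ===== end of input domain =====

-- B keeps A's in-place reverse sort of dct but stages the work: a first pass records only the
-- DFS enter/exit event trace, a second pass replays the trace assigning start at enter events
-- and end[i] = order - 1 at exit events, with no parent/depth/order_to_node arrays and no
-- upward end[parent]=end[child] propagation (objective: alternative).  Both Pythons mutate dct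
-- in place identically (each dct[i] sorted descending); the equivalence proved is about the
-- return value.

-- shared Python-semantics helpers for list indexing/assignment
-- xs[i] read: Python raises IndexError when out of range; Pre_ keeps every read in range,
-- so the .getD default is never used on admitted inputs.
def pvGet (xs : List Int) (i : Int) : Int := (PySem.List.pyGet? xs i).getD 0
def pvGetL (xs : List (List Int)) (i : Int) : List Int := (PySem.List.pyGet? xs i).getD []
-- xs[i] = v: negative i wraps like Python; out of range is IndexError in Python, a no-op here
-- (unreachable under Pre_).
def pvSet (xs : List Int) (i v : Int) : List Int :=
  if i < 0 then (if 0 ≤ i + (xs.length : Int) then xs.set (i + xs.length).toNat v else xs)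
  else (if i < (xs.length : Int) then xs.set i.toNat v else xs)

-- ===== PORT A =====
-- the while-loop of A; fuel is an upper bound on the number of iterations (exact under Pre_)
def loopA (dct : List (List Int)) : Nat → Int → List Int → List Int → List Int → List Int → List Int → List (Int × Int) → (List Int × List Int)
  | 0, _, start, end_, _, _, _, _ => (start, end_)
  | fuel+1, order, start, end_, parent, depth, otn, stack =>
    match stack with
    | [] => (start, end_)
    | (i, fa) :: rest =>
      if 0 ≤ i then
        let start' := pvSet start i order
        let otn' := pvSet otn order i
        let end' := pvSet end_ i order
        let order' := order + 1
        let st0 : List (Int × Int) := (-i-1, fa) :: rest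
        let acc' := (pvGetL dct i).foldl
          (fun (acc : List Int × List Int × List (Int × Int)) j =>
            if j ≠ fa then (pvSet acc.1 j i, pvSet acc.2.1 j (pvGet acc.2.1 i + 1), (j, i) :: acc.2.2)
            else acc) (parent, depth, st0)
        loopA dct fuel order' start' end' acc'.1 acc'.2.1 otn' acc'.2.2
      else
        let i' := -i-1
        let end' := if pvGet parent i' ≠ -1 then pvSet end_ (pvGet parent i') (pvGet end_ i') else end_
        loopA dct fuel order start end' parent depth otn rest

def gen_bfs_order_iteration (dct : List (List Int)) (root : Int) : List Int × List Int :=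
  let n := dct.length
  let dct' := dct.map (fun l => PySem.List.sorted l (fun x => x) true)
  let fuel := 1 + n + (dct.foldl (fun a l => a + l.length) 0)
  loopA dct' fuel 0 (List.replicate n (-1)) (List.replicate n (-1)) (List.replicate n (-1))
    (List.replicate n 0) (List.replicate n (-1)) [(root, -1)]

-- ===== PORT B =====
-- B-side write xs[pos] = v (same Python semantics as pvSet, written independently;
-- out of range is IndexError in Python, a no-op here, unreachable under Pre_)
def bset (xs : List Int) (pos v : Int) : List Int :=
  let k : Int := if pos < 0 then pos + xs.length else pos
  if 0 ≤ k ∧ k < (xs.length : Int) then xs.set k.toNat v else xs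

-- dct[u] for the nonnegative in-range u phase 1 uses (equal to pvGetL there)
def childRow (g : List (List Int)) (u : Int) : List Int := (g.drop u.toNat).headD []

-- phase 1 of B: collect the enter/exit event trace of the DFS; the interval
-- arrays are not touched here at all
def evLoop (g : List (List Int)) : Nat → List Int → List (Int × Int) → List Int
  | 0, trace, _ => trace
  | gas+1, trace, frames =>
    match frames with
    | [] => trace
    | (u, p) :: rs =>
      if u < 0 then evLoop g gas (trace ++ [u]) rs
      else
        evLoop g gas (trace ++ [u])
          ((childRow g u).foldl (fun acc w => if w == p then acc else (w, u) :: acc) ((-u-1, p) :: rs))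

-- phase 2 of B: replay the trace; cnt is the running preorder counter
def replay : List Int → Int → List Int → List Int → (List Int × List Int)
  | [], _, st, en => (st, en)
  | e :: es, cnt, st, en =>
    if e < 0 then replay es cnt st (bset en (-e-1) (cnt - 1))
    else replay es (cnt + 1) (bset st e cnt) en

def gen_bfs_order_iteration_alt (dct : List (List Int)) (root : Int) : List Int × List Int :=
  let m := dct.length
  let g := dct.map (fun row => PySem.List.sorted row (fun z => z) true)
  replay (evLoop g (m + ((dct.map List.length).sum + 1)) [] [(root, -1)]) 0
    (List.replicate m (-1)) (List.replicate m (-1))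

-- ===== PRECONDITION & SPEC =====
-- breadth-first reachability iteration used only to phrase the precondition
def pvReach (dct : List (List Int)) (root : Int) : Nat → List Int
  | 0 => [root]
  | t+1 => pvReach dct root t ++ (pvReach dct root t).flatMap (fun i => pvGetL dct i)
-- pvDep dct root i = BFS level of node i from root (none if unreachable within n steps)
def pvDepFrom (dct : List (List Int)) (root : Int) (i : Int) : Nat → Nat → Option Nat
  | _, 0 => none
  | t, k+1 => if i ∈ pvReach dct root t then some t else pvDepFrom dct root i (t+1) k
def pvDep (dct : List (List Int)) (root : Int) (i : Int) : Option Nat :=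
  pvDepFrom dct root i 0 (dct.length + 1)

-- conditions making the part of dct reachable from root an undirected rooted tree:
-- every reachable node's list is duplicate-free with in-range symmetric entries, and every
-- reachable non-root node has exactly one neighbour on the previous BFS level and none on its own
def pvTreeSide (dct : List (List Int)) (root : Int) : Prop :=
  0 ≤ root ∧ root < (dct.length : Int) ∧
  (∀ i : Nat, i < dct.length → (pvDep dct root (i : Int)).isSome →
    ((dct.getD i []).Nodup ∧
     (∀ j ∈ dct.getD i [], 0 ≤ j ∧ j < (dct.length : Int) ∧ (i : Int) ∈ pvGetL dct j) ∧
     (∀ t ∈ (pvDep dct root (i : Int)).toList, ∀ j ∈ dct.getD i [],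
         pvDep dct root j = some (t+1) ∨ (1 ≤ t ∧ pvDep dct root j = some (t-1))) ∧
     ((i : Int) ≠ root → ∀ t ∈ (pvDep dct root (i : Int)).toList,
         ((dct.getD i []).filter (fun j => pvDep dct root j == some (t-1))).length = 1)))

-- Pre_ = either root is a negative index whose bitwise complement is a valid node (then the
-- single initial frame is popped as an exit marker and both programs return the untouched
-- arrays), or root is a valid node and the part of dct reachable from it is an undirected
-- rooted tree (the template's intended domain).  Outside Pre_ A may revisit nodes, raise
-- IndexError, or not terminate.  (Pre_ does exclude some inputs on which A returns, e.g.
-- non-symmetric lists: see the cite in the claim.)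
def Pre_gen_bfs_order_iteration (dct : List (List Int)) (root : Int) : Prop :=
  (root < 0 ∧ -root-1 < (dct.length : Int)) ∨ pvTreeSide dct root

instance (dct : List (List Int)) (root : Int) : Decidable (Pre_gen_bfs_order_iteration dct root) := by
  unfold Pre_gen_bfs_order_iteration pvTreeSide
  letI d4 : ∀ i : Nat, Decidable ((i : Int) ≠ root → ∀ t ∈ (pvDep dct root (i : Int)).toList,
      ((dct.getD i []).filter (fun j => pvDep dct root j == some (t-1))).length = 1) :=
    fun i => by infer_instance
  infer_instance

def pvWitness_gen_bfs_order_iteration : List (List Int) × Int := ([[1, 2], [0], [0]], 0)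

def Spec_gen_bfs_order_iteration (dct : List (List Int)) (root : Int) (out : List Int × List Int) : Prop := out = gen_bfs_order_iteration_alt dct root
instance (dct : List (List Int)) (root : Int) (out : List Int × List Int) : Decidable (Spec_gen_bfs_order_iteration dct root out) := by unfold Spec_gen_bfs_order_iteration; infer_instance

-- ===== CLAIM (what is proved, stated in full; the proofs are below) =====
def Claim_equal_gen_bfs_order_iteration : Prop := ∀ (dct : List (List Int)) (root : Int), Dom_gen_bfs_order_iteration dct root → Pre_gen_bfs_order_iteration dct root → Spec_gen_bfs_order_iteration dct root (gen_bfs_order_iteration dct root)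

-- ===== LEMMAS AND PROOFS =====

theorem pv_witness_ok :
    Dom_gen_bfs_order_iteration pvWitness_gen_bfs_order_iteration.1 pvWitness_gen_bfs_order_iteration.2 ∧
    Pre_gen_bfs_order_iteration pvWitness_gen_bfs_order_iteration.1 pvWitness_gen_bfs_order_iteration.2 := by
  constructor <;> decide

-- ---------- proof-only intermediate program ----------
-- loopMid fuses B's two phases back into one sentinel loop that writes start at enter
-- and end[i] = order - 1 at exit; the proof goes  loopA ≈ loopMid ≈ (evLoop + replay).

def loopMid (dct : List (List Int)) : Nat → Int → List Int → List Int → List (Int × Int) → (List Int × List Int)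
  | 0, _, start, end_, _ => (start, end_)
  | fuel+1, order, start, end_, stack =>
    match stack with
    | [] => (start, end_)
    | (i, fa) :: rest =>
      if 0 ≤ i then
        let start' := pvSet start i order
        let order' := order + 1
        let stack' := (pvGetL dct i).foldl
          (fun (st : List (Int × Int)) j => if j ≠ fa then (j, i) :: st else st) ((-i-1, fa) :: rest)
        loopMid dct fuel order' start' end_ stack'
      else
        loopMid dct fuel order start (pvSet end_ (-i-1) (order - 1)) rest

-- ---------- B's staged form replays to loopMid ----------

theorem bset_eq (xs : List Int) (pos v : Int) : bset xs pos v = pvSet xs pos v := by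
  simp only [bset, pvSet]
  split_ifs <;> first | rfl | omega

theorem childRow_eq (g : List (List Int)) (u : Int) (hu : 0 ≤ u) :
    childRow g u = pvGetL g u := by
  unfold childRow pvGetL
  rw [PySem.List.pyGet?_of_nonneg g hu]
  rw [List.headD_eq_head?_getD, List.head?_drop]

theorem evLoop_accum (g : List (List Int)) :
    ∀ (fuel : Nat) (evs : List Int) (stack : List (Int × Int)),
      evLoop g fuel evs stack = evs ++ evLoop g fuel [] stack := by
  intro fuel
  induction fuel with
  | zero => intro evs stack; simp [evLoop]
  | succ f ih =>
    intro evs stack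
    match stack with
    | [] => simp [evLoop]
    | (u, p) :: rs =>
      simp only [evLoop]
      by_cases hu : u < 0
      · rw [if_pos hu, if_pos hu, ih (evs ++ [u]), ih ([] ++ [u])]; simp
      · rw [if_neg hu, if_neg hu, ih (evs ++ [u]), ih ([] ++ [u])]; simp

theorem mid_eq_replay (g : List (List Int)) :
    ∀ (fuel : Nat) (cnt : Int) (st en : List Int) (stack : List (Int × Int)),
      replay (evLoop g fuel [] stack) cnt st en = loopMid g fuel cnt st en stack := by
  intro fuel
  induction fuel with
  | zero => intro cnt st en stack; simp [evLoop, replay, loopMid]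
  | succ f ih =>
    intro cnt st en stack
    match stack with
    | [] => simp [evLoop, replay, loopMid]
    | (u, p) :: rs =>
      simp only [evLoop, loopMid]
      by_cases hu : u < 0
      · rw [if_pos hu, if_neg (by omega : ¬ (0 ≤ u)), evLoop_accum g f ([] ++ [u])]
        simp only [List.nil_append, List.singleton_append, replay]
        rw [if_pos hu, bset_eq]
        exact ih cnt st (pvSet en (-u-1) (cnt - 1)) rs
      · rw [if_neg hu, if_pos (by omega : (0 ≤ u)), evLoop_accum g f ([] ++ [u])]
        simp only [List.nil_append, List.singleton_append, replay]
        rw [if_neg hu, bset_eq]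
        rw [show (childRow g u).foldl (fun acc w => if w == p then acc else (w, u) :: acc)
              ((-u-1, p) :: rs) =
            (pvGetL g u).foldl (fun st j => if j ≠ p then (j, u) :: st else st)
              ((-u-1, p) :: rs) by
          rw [childRow_eq g u (by omega)]
          congr 1
          funext acc w
          by_cases h : w = p <;> simp [h]]
        exact ih (cnt + 1) (pvSet st u cnt) en _

-- ---------- proof-only helpers ----------

def aget (xs : List Int) (i : Int) : Int := (xs[i.toNat]?).getD 0

def parF (dct : List (List Int)) (root : Int) (i : Int) : Option Int :=
  match pvDep dct root i with
  | some (t+1) => (pvGetL dct i).find? (fun j => pvDep dct root j == some t)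
  | _ => none

def pendNodes (s : List (Int × Int)) : List Int :=
  s.filterMap (fun f => if 0 ≤ f.1 then some f.1 else none)

-- ---------- array lemmas ----------

theorem pvGet_eq_aget (xs : List Int) (i : Int) (h0 : 0 ≤ i) : pvGet xs i = aget xs i := by
  simp [pvGet, aget, PySem.List.pyGet?_of_nonneg xs h0]

theorem length_pvSet (xs : List Int) (i v : Int) : (pvSet xs i v).length = xs.length := by
  unfold pvSet; split <;> split <;> simp

theorem pvSet_eq_set (xs : List Int) (i v : Int) (h0 : 0 ≤ i) (h1 : i < (xs.length : Int)) :
    pvSet xs i v = xs.set i.toNat v := by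
  unfold pvSet
  rw [if_neg (by omega), if_pos h1]

theorem aget_pvSet_self (xs : List Int) (i v : Int) (h0 : 0 ≤ i) (h1 : i < (xs.length : Int)) :
    aget (pvSet xs i v) i = v := by
  rw [pvSet_eq_set xs i v h0 h1]
  simp only [aget]
  rw [List.getElem?_set_self (by omega)]
  rfl

theorem aget_pvSet_ne (xs : List Int) (i v x : Int) (h0 : 0 ≤ i) (hx : 0 ≤ x) (hne : i ≠ x) :
    aget (pvSet xs i v) x = aget xs x := by
  unfold pvSet
  rw [if_neg (by omega)]
  split
  · simp only [aget]
    rw [List.getElem?_set_ne (by omega)]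
  · rfl

theorem pvGetL_nonneg (dct : List (List Int)) (i : Int) (h0 : 0 ≤ i) :
    pvGetL dct i = dct.getD i.toNat [] := by
  simp [pvGetL, PySem.List.pyGet?_of_nonneg dct h0, List.getD]

theorem aget_eq_of_agree (xs ys : List Int) (hl : xs.length = ys.length)
    (h : ∀ i : Int, 0 ≤ i → i < (xs.length : Int) → aget xs i = aget ys i) : xs = ys := by
  apply List.ext_getElem hl
  intro n h1 h2
  have := h n (by positivity) (by exact_mod_cast h1)
  simp only [aget, Int.toNat_natCast] at this
  rw [List.getElem?_eq_getElem h1, List.getElem?_eq_getElem h2] at this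
  simpa using this

-- ---------- pvDep lemmas ----------

theorem pvDep_root (dct : List (List Int)) (root : Int) : pvDep dct root root = some 0 := by
  unfold pvDep pvDepFrom
  simp [pvReach]

-- ---------- tree-side accessor lemmas ----------

theorem pre_root_range (dct : List (List Int)) (root : Int)
    (hpre : pvTreeSide dct root) : 0 ≤ root ∧ root < (dct.length : Int) :=
  ⟨hpre.1, hpre.2.1⟩

theorem tree_main (dct : List (List Int)) (root : Int) (hpre : pvTreeSide dct root)
    (i : Int) (t : Nat) (h0 : 0 ≤ i) (h1 : i < (dct.length : Int))
    (hd : pvDep dct root i = some t) :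
    (dct.getD i.toNat []).Nodup ∧
    (∀ j ∈ dct.getD i.toNat [], 0 ≤ j ∧ j < (dct.length : Int) ∧ i ∈ pvGetL dct j) ∧
    (∀ j ∈ dct.getD i.toNat [],
        pvDep dct root j = some (t+1) ∨ (1 ≤ t ∧ pvDep dct root j = some (t-1))) ∧
    (i ≠ root →
        ((dct.getD i.toNat []).filter (fun j => pvDep dct root j == some (t-1))).length = 1) := by
  have hcast : ((i.toNat : Nat) : Int) = i := Int.toNat_of_nonneg h0
  have hm := hpre.2.2 i.toNat (by omega) (by rw [hcast, hd]; rfl)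
  rw [hcast] at hm
  refine ⟨hm.1, hm.2.1, ?_, ?_⟩
  · exact hm.2.2.1 t (by rw [Option.mem_toList]; exact hd)
  · intro hroot
    exact hm.2.2.2 hroot t (by rw [Option.mem_toList]; exact hd)

theorem nbr_range (dct : List (List Int)) (root : Int)
    (hpre : pvTreeSide dct root) (i j : Int) (t : Nat) (h0 : 0 ≤ i) (h1 : i < (dct.length : Int))
    (hd : pvDep dct root i = some t)
    (hj : j ∈ dct.getD i.toNat []) : 0 ≤ j ∧ j < (dct.length : Int) := by
  have := (tree_main dct root hpre i t h0 h1 hd).2.1 j hj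
  exact ⟨this.1, this.2.1⟩

theorem nbr_nodup (dct : List (List Int)) (root : Int)
    (hpre : pvTreeSide dct root) (i : Int) (t : Nat) (h0 : 0 ≤ i) (h1 : i < (dct.length : Int))
    (hd : pvDep dct root i = some t) :
    (dct.getD i.toNat []).Nodup :=
  (tree_main dct root hpre i t h0 h1 hd).1

theorem nbr_sym (dct : List (List Int)) (root : Int)
    (hpre : pvTreeSide dct root) (i j : Int) (t : Nat) (h0 : 0 ≤ i) (h1 : i < (dct.length : Int))
    (hd : pvDep dct root i = some t)
    (hj : j ∈ dct.getD i.toNat []) : i ∈ pvGetL dct j :=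
  ((tree_main dct root hpre i t h0 h1 hd).2.1 j hj).2.2

theorem nbr_level (dct : List (List Int)) (root : Int)
    (hpre : pvTreeSide dct root) (i j : Int) (t : Nat) (h0 : 0 ≤ i)
    (h1 : i < (dct.length : Int)) (hd : pvDep dct root i = some t) (hj : j ∈ dct.getD i.toNat []) :
    pvDep dct root j = some (t+1) ∨ (1 ≤ t ∧ pvDep dct root j = some (t-1)) :=
  (tree_main dct root hpre i t h0 h1 hd).2.2.1 j hj

theorem nbr_uniq (dct : List (List Int)) (root : Int)
    (hpre : pvTreeSide dct root) (i : Int) (t : Nat) (h0 : 0 ≤ i)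
    (h1 : i < (dct.length : Int)) (hroot : i ≠ root) (hd : pvDep dct root i = some t) :
    ((dct.getD i.toNat []).filter (fun j => pvDep dct root j == some (t-1))).length = 1 :=
  (tree_main dct root hpre i t h0 h1 hd).2.2.2 hroot

-- ---------- parF lemmas ----------

theorem parF_root (dct : List (List Int)) (root : Int) : parF dct root root = none := by
  simp [parF, pvDep_root]

theorem parF_some_elim (dct : List (List Int)) (root c v : Int)
    (h : parF dct root c = some v) :
    ∃ t, pvDep dct root c = some (t+1) ∧ v ∈ pvGetL dct c ∧ pvDep dct root v = some t := by
  unfold parF at h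
  split at h
  · rename_i t hdep
    refine ⟨t, hdep, List.mem_of_find?_eq_some h, ?_⟩
    have := List.find?_some h
    simpa using this
  · cases h

theorem parF_ne_root (dct : List (List Int)) (root c v : Int)
    (h : parF dct root c = some v) : c ≠ root := by
  intro he; subst he
  rw [parF_root] at h; cases h

theorem parF_ne_self (dct : List (List Int)) (root c v : Int)
    (h : parF dct root c = some v) : c ≠ v := by
  obtain ⟨t, h1, _, h3⟩ := parF_some_elim dct root c v h
  intro he; subst he
  rw [h1] at h3; simp only [Option.some.injEq] at h3; omega

theorem parF_unique_parent (dct : List (List Int)) (root : Int)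
    (hpre : pvTreeSide dct root) (j c : Int) (t : Nat)
    (h0 : 0 ≤ j) (h1 : j < (dct.length : Int))
    (hdj : pvDep dct root j = some (t+1)) (hc : c ∈ pvGetL dct j)
    (hdc : pvDep dct root c = some t) : parF dct root j = some c := by
  have hjroot : j ≠ root := by
    intro he; subst he; rw [pvDep_root] at hdj; cases hdj
  have huniq := nbr_uniq dct root hpre j (t+1) h0 h1 hjroot hdj
  simp only [Nat.add_sub_cancel] at huniq
  unfold parF
  rw [hdj]
  dsimp only
  have hLget : pvGetL dct j = dct.getD j.toNat [] := pvGetL_nonneg dct j h0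
  rw [hLget] at hc ⊢
  have hex : ∃ x ∈ dct.getD j.toNat [], (pvDep dct root x == some t) = true :=
    ⟨c, hc, by simp [hdc]⟩
  obtain ⟨x, hfind⟩ := Option.isSome_iff_exists.mp (List.find?_isSome.mpr hex)
  rw [hfind]
  have hxmem := List.mem_of_find?_eq_some hfind
  have hxp := List.find?_some hfind
  obtain ⟨a, ha⟩ := List.length_eq_one_iff.mp huniq
  have hxa : x ∈ (dct.getD j.toNat []).filter (fun j' => pvDep dct root j' == some t) :=
    List.mem_filter.mpr ⟨hxmem, hxp⟩
  have hca : c ∈ (dct.getD j.toNat []).filter (fun j' => pvDep dct root j' == some t) :=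
    List.mem_filter.mpr ⟨hc, by simp [hdc]⟩
  rw [ha] at hxa hca
  simp at hxa hca
  rw [hxa, hca]

theorem parF_of_nbr (dct : List (List Int)) (root : Int)
    (hpre : pvTreeSide dct root) (c v j : Int)
    (h0 : 0 ≤ c) (h1 : c < (dct.length : Int))
    (hpc : parF dct root c = some v) (hj : j ∈ pvGetL dct c) (hjv : j ≠ v) :
    parF dct root j = some c := by
  obtain ⟨t, hdc, hv, hdv⟩ := parF_some_elim dct root c v hpc
  rw [pvGetL_nonneg dct c h0] at hj hv
  have hjr := nbr_range dct root hpre c j (t+1) h0 h1 hdc hj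
  have hcroot : c ≠ root := parF_ne_root dct root c v hpc
  rcases nbr_level dct root hpre c j (t+1) h0 h1 hdc hj with hup | ⟨_, hdown⟩
  · -- j is one level deeper: c is its unique parent
    have hsym : c ∈ pvGetL dct j := nbr_sym dct root hpre c j (t+1) h0 h1 hdc hj
    exact parF_unique_parent dct root hpre j c (t+1) hjr.1 hjr.2 hup hsym hdc
  · -- j would be a second lower neighbour of c: contradicts uniqueness
    exfalso
    simp only [Nat.add_sub_cancel] at hdown
    have huniq := nbr_uniq dct root hpre c (t+1) h0 h1 hcroot hdc
    simp only [Nat.add_sub_cancel] at huniq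
    obtain ⟨a, ha⟩ := List.length_eq_one_iff.mp huniq
    have hja : j ∈ (dct.getD c.toNat []).filter (fun j' => pvDep dct root j' == some t) :=
      List.mem_filter.mpr ⟨hj, by simp [hdown]⟩
    have hva : v ∈ (dct.getD c.toNat []).filter (fun j' => pvDep dct root j' == some t) :=
      List.mem_filter.mpr ⟨hv, by simp [hdv]⟩
    rw [ha] at hja hva
    simp at hja hva
    exact hjv (hja.trans hva.symm)

theorem parF_of_root_nbr (dct : List (List Int)) (root : Int)
    (hpre : pvTreeSide dct root) (j : Int)
    (hj : j ∈ pvGetL dct root) : parF dct root j = some root := by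
  obtain ⟨hr0, hr1⟩ := pre_root_range dct root hpre
  rw [pvGetL_nonneg dct root hr0] at hj
  have hjr := nbr_range dct root hpre root j 0 hr0 hr1 (pvDep_root dct root) hj
  rcases nbr_level dct root hpre root j 0 hr0 hr1 (pvDep_root dct root) hj with hup | ⟨h10, _⟩
  · have hsym : root ∈ pvGetL dct j := nbr_sym dct root hpre root j 0 hr0 hr1 (pvDep_root dct root) hj
    exact parF_unique_parent dct root hpre j root 0 hjr.1 hjr.2 hup hsym (pvDep_root dct root)
  · omega

-- ---------- pendNodes lemmas ----------

theorem pendNodes_nil : pendNodes [] = [] := rfl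

theorem pendNodes_cons_pos (c v : Int) (s : List (Int × Int)) (h : 0 ≤ c) :
    pendNodes ((c, v) :: s) = c :: pendNodes s := by simp [pendNodes, h]

theorem pendNodes_cons_neg (c v : Int) (s : List (Int × Int)) (h : ¬ 0 ≤ c) :
    pendNodes ((c, v) :: s) = pendNodes s := by simp [pendNodes, h]

-- ---------- the DFS stack invariant ----------

-- stack shape during the common traversal: pending child frames grouped under the chain of
-- open (entered, not yet exited) nodes, each sentinel carrying its node's unique tree parent.
inductive StackOK (dct : List (List Int)) (root : Int) (parent start : List Int) :
    List (Int × Int) → List Int → Prop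
  | base : StackOK dct root parent start [] []
  | init :
      0 ≤ root → root < (dct.length : Int) →
      aget start root = -1 → aget parent root = -1 →
      StackOK dct root parent start [(root, -1)] []
  | sent {s : List (Int × Int)} {ch : List Int} (v f : Int) :
      StackOK dct root parent start s ch →
      0 ≤ v → v < (dct.length : Int) →
      aget start v ≠ -1 →
      (ch = [] → v = root ∧ aget parent v = -1) →
      (∀ p ch', ch = p :: ch' → parF dct root v = some p ∧ aget parent v = p) →
      StackOK dct root parent start ((-v-1, f) :: s) (v :: ch)
  | child {s : List (Int × Int)} {ch : List Int} (v c : Int) :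
      StackOK dct root parent start s (v :: ch) →
      0 ≤ c → c < (dct.length : Int) →
      aget start c = -1 →
      parF dct root c = some v →
      aget parent c = v →
      c ∉ pendNodes s →
      StackOK dct root parent start ((c, v) :: s) (v :: ch)

theorem stackok_chain_mem {dct : List (List Int)} {root : Int} {parent start : List Int}
    {stack : List (Int × Int)} {ch : List Int}
    (h : StackOK dct root parent start stack ch) :
    ∀ v ∈ ch, 0 ≤ v ∧ v < (dct.length : Int) ∧ aget start v ≠ -1 := by
  induction h with
  | base => intro v hv; cases hv
  | init => intro v hv; cases hv
  | sent v f _ h1 h2 h3 _ _ ih =>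
    intro w hw
    rcases List.mem_cons.mp hw with he | hm
    · subst he; exact ⟨h1, h2, h3⟩
    · exact ih w hm
  | child v c _ _ _ _ _ _ _ ih => exact ih

theorem stackok_chain_parvis {dct : List (List Int)} {root : Int} {parent start : List Int}
    {stack : List (Int × Int)} {ch : List Int}
    (h : StackOK dct root parent start stack ch) :
    ∀ v ∈ ch, v = root ∨ ∃ q, parF dct root v = some q ∧ aget start q ≠ -1 := by
  induction h with
  | base => intro v hv; cases hv
  | init => intro v hv; cases hv
  | sent v f hs _ _ _ hnil hcons ih =>
    intro w hw
    rcases List.mem_cons.mp hw with he | hm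
    · subst he
      cases hch : ‹List Int› with
      | nil => exact Or.inl (hnil hch).1
      | cons p ch' =>
        right
        refine ⟨p, (hcons p ch' hch).1, ?_⟩
        exact (stackok_chain_mem hs p (hch ▸ List.mem_cons_self ..)).2.2
    · exact ih w hm
  | child v c _ _ _ _ _ _ _ ih => exact ih

theorem stackok_pend {dct : List (List Int)} {root : Int} {parent start : List Int}
    {stack : List (Int × Int)} {ch : List Int}
    (h : StackOK dct root parent start stack ch) :
    ∀ x ∈ pendNodes stack, 0 ≤ x ∧ x < (dct.length : Int) ∧ aget start x = -1 ∧
      (x = root ∨ ∃ q, parF dct root x = some q ∧ aget start q ≠ -1) := by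
  induction h with
  | base => intro x hx; simp [pendNodes_nil] at hx
  | init h1 h2 h3 _ =>
    intro x hx
    rw [pendNodes_cons_pos _ _ _ h1, pendNodes_nil] at hx
    rcases List.mem_cons.mp hx with he | hm
    · subst he; exact ⟨h1, h2, h3, Or.inl rfl⟩
    · cases hm
  | sent v f _ h1 _ _ _ _ ih =>
    intro x hx
    rw [pendNodes_cons_neg _ _ _ (by omega)] at hx
    exact ih x hx
  | child v c hs h1 h2 h3 h4 _ _ ih =>
    intro x hx
    rw [pendNodes_cons_pos _ _ _ h1] at hx
    rcases List.mem_cons.mp hx with he | hm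
    · subst he
      refine ⟨h1, h2, h3, Or.inr ⟨v, h4, ?_⟩⟩
      exact (stackok_chain_mem hs v (List.mem_cons_self ..)).2.2
    · exact ih x hm

theorem stackok_congr {dct : List (List Int)} {root : Int} {parent start parent' start' : List Int}
    {stack : List (Int × Int)} {ch : List Int}
    (h : StackOK dct root parent start stack ch)
    (hch : ∀ x ∈ ch, aget parent' x = aget parent x ∧ aget start' x = aget start x)
    (hpd : ∀ x ∈ pendNodes stack, aget parent' x = aget parent x ∧ aget start' x = aget start x) :
    StackOK dct root parent' start' stack ch := by
  induction h with
  | base => exact StackOK.base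
  | init h1 h2 h3 h4 =>
    have hr := hpd root (by rw [pendNodes_cons_pos _ _ _ h1, pendNodes_nil]; exact List.mem_cons_self ..)
    exact StackOK.init h1 h2 (by rw [hr.2]; exact h3) (by rw [hr.1]; exact h4)
  | sent v f hs h1 h2 h3 hnil hcons ih =>
    have hv := hch v (List.mem_cons_self ..)
    refine StackOK.sent v f ?_ h1 h2 (by rw [hv.2]; exact h3) ?_ ?_
    · refine ih ?_ ?_
      · intro x hx; exact hch x (List.mem_cons_of_mem _ hx)
      · intro x hx; apply hpd; rw [pendNodes_cons_neg _ _ _ (by omega)]; exact hx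
    · intro he; exact ⟨(hnil he).1, by rw [hv.1]; exact (hnil he).2⟩
    · intro p ch' he; exact ⟨(hcons p ch' he).1, by rw [hv.1]; exact (hcons p ch' he).2⟩
  | child v c hs h1 h2 h3 h4 h5 h6 ih =>
    have hcx := hpd c (by rw [pendNodes_cons_pos _ _ _ h1]; exact List.mem_cons_self ..)
    refine StackOK.child v c ?_ h1 h2 (by rw [hcx.2]; exact h3) h4 (by rw [hcx.1]; exact h5) h6
    refine ih hch ?_
    intro x hx; apply hpd; rw [pendNodes_cons_pos _ _ _ h1]; exact List.mem_cons_of_mem _ hx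

-- pushing a block of fresh children onto a well-formed stack
theorem stackok_push {dct : List (List Int)} {root : Int} {parent start : List Int} (v : Int)
    {ch : List Int} :
    ∀ (L : List Int) (base : List (Int × Int)),
    StackOK dct root parent start base (v :: ch) →
    (∀ j ∈ L, 0 ≤ j ∧ j < (dct.length : Int) ∧ aget start j = -1 ∧ parF dct root j = some v ∧
        aget parent j = v ∧ j ∉ pendNodes base) →
    L.Nodup →
    StackOK dct root parent start (L.foldl (fun st j => (j, v) :: st) base) (v :: ch) := by
  intro L
  induction L with
  | nil => intro base hb _ _; exact hb
  | cons j L' ih =>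
    intro base hb hL hnd
    have hj := hL j (List.mem_cons_self ..)
    simp only [List.foldl_cons]
    refine ih ((j, v) :: base) ?_ ?_ (List.Nodup.of_cons hnd)
    · exact StackOK.child v j hb hj.1 hj.2.1 hj.2.2.1 hj.2.2.2.1 hj.2.2.2.2.1 hj.2.2.2.2.2
    · intro x hx
      have hxL := hL x (List.mem_cons_of_mem _ hx)
      refine ⟨hxL.1, hxL.2.1, hxL.2.2.1, hxL.2.2.2.1, hxL.2.2.2.2.1, ?_⟩
      rw [pendNodes_cons_pos _ _ _ hj.1]
      intro hmem
      rcases List.mem_cons.mp hmem with he | hm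
      · subst he; exact (List.nodup_cons.mp hnd).1 hx
      · exact hxL.2.2.2.2.2 hm

-- ---------- fold bookkeeping lemmas ----------

theorem foldl_if_filter {β : Type} (l : List Int) (fa : Int) (g : β → Int → β) (b : β) :
    l.foldl (fun st j => if j ≠ fa then g st j else st) b =
      (l.filter (fun j => j ≠ fa)).foldl g b := by
  induction l generalizing b with
  | nil => rfl
  | cons j l' ih =>
    rw [List.foldl_cons, List.filter_cons]
    by_cases hj : j = fa
    · subst hj
      rw [if_neg (by simp), if_neg (by simp)]
      exact ih b
    · rw [if_pos hj, if_pos (by simp [hj]), List.foldl_cons]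
      exact ih (g b j)

theorem foldl_push_length (l : List Int) (v : Int) (b : List (Int × Int)) :
    (l.foldl (fun st j => (j, v) :: st) b).length = l.length + b.length := by
  induction l generalizing b with
  | nil => simp
  | cons j l' ih => simp; omega

theorem foldA_third (l : List Int) (fa i : Int) (p d : List Int) (st : List (Int × Int)) :
    (l.foldl (fun (acc : List Int × List Int × List (Int × Int)) j =>
        if j ≠ fa then (pvSet acc.1 j i, pvSet acc.2.1 j (pvGet acc.2.1 i + 1), (j, i) :: acc.2.2)
        else acc) (p, d, st)).2.2 =
      l.foldl (fun (st : List (Int × Int)) j => if j ≠ fa then (j, i) :: st else st) st := by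
  induction l generalizing p d st with
  | nil => rfl
  | cons j l' ih =>
    rw [List.foldl_cons, List.foldl_cons]
    by_cases hj : j = fa
    · subst hj
      rw [if_neg (by simp), if_neg (by simp)]
      exact ih p d st
    · rw [if_pos hj, if_pos hj]
      exact ih _ _ _

theorem foldA_first_length (l : List Int) (fa i : Int) (p d : List Int) (st : List (Int × Int)) :
    ((l.foldl (fun (acc : List Int × List Int × List (Int × Int)) j =>
        if j ≠ fa then (pvSet acc.1 j i, pvSet acc.2.1 j (pvGet acc.2.1 i + 1), (j, i) :: acc.2.2)
        else acc) (p, d, st)).1).length = p.length := by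
  induction l generalizing p d st with
  | nil => rfl
  | cons j l' ih =>
    rw [List.foldl_cons]
    by_cases hj : j = fa
    · subst hj
      rw [if_neg (by simp)]
      exact ih p d st
    · rw [if_pos hj]
      rw [ih]
      exact length_pvSet p j i

theorem foldA_first_aget (l : List Int) (fa i : Int) (p d : List Int) (st : List (Int × Int))
    (hl : ∀ j ∈ l, 0 ≤ j ∧ j < (p.length : Int)) (x : Int) (hx : 0 ≤ x) :
    aget ((l.foldl (fun (acc : List Int × List Int × List (Int × Int)) j =>
        if j ≠ fa then (pvSet acc.1 j i, pvSet acc.2.1 j (pvGet acc.2.1 i + 1), (j, i) :: acc.2.2)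
        else acc) (p, d, st)).1) x =
      if x ∈ l.filter (fun j => j ≠ fa) then i else aget p x := by
  induction l generalizing p d st with
  | nil => simp
  | cons j l' ih =>
    have hj' := hl j (List.mem_cons_self ..)
    rw [List.foldl_cons, List.filter_cons]
    by_cases hj : j = fa
    · subst hj
      rw [if_neg (show ¬ (j ≠ j) by simp), if_neg (show ¬ (decide (j ≠ j) = true) by simp)]
      exact ih p d st (fun a ha => hl a (List.mem_cons_of_mem _ ha))
    · rw [if_pos (show (j : Int) ≠ fa from hj), if_pos (show (decide ((j : Int) ≠ fa)) = true by simp [hj])]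
      rw [ih _ _ _ (fun a ha => by
        have := hl a (List.mem_cons_of_mem _ ha)
        rwa [length_pvSet])]
      by_cases hmem : x ∈ l'.filter (fun j => j ≠ fa)
      · rw [if_pos hmem, if_pos (List.mem_cons_of_mem _ hmem)]
      · by_cases hxj : x = j
        · subst hxj
          rw [if_neg hmem, if_pos (List.mem_cons_self ..)]
          exact aget_pvSet_self p x i hj'.1 hj'.2
        · rw [if_neg hmem, if_neg (by
            intro hc
            rcases List.mem_cons.mp hc with h | h
            · exact hxj h
            · exact hmem h)]
          exact aget_pvSet_ne p j i x hj'.1 hx (fun he => hxj he.symm)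

-- ---------- termination measure ----------

def unvis (dct' : List (List Int)) (start : List Int) : Nat :=
  ∑ x ∈ Finset.range dct'.length,
    (if aget start (x : Int) = -1 then 1 + (pvGetL dct' (x : Int)).length else 0)

theorem unvis_step (dct' : List (List Int)) (start : List Int) (c v : Int)
    (h0 : 0 ≤ c) (h1 : c < (dct'.length : Int)) (hc : aget start c = -1) (hv : v ≠ -1) :
    unvis dct' start = unvis dct' (pvSet start c v) + (1 + (pvGetL dct' c).length) := by
  have hm : c.toNat ∈ Finset.range dct'.length := by
    simp [Finset.mem_range]; omega
  have hcast : ((c.toNat : Int)) = c := Int.toNat_of_nonneg h0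
  unfold unvis
  rw [← Finset.add_sum_erase _ _ hm, ← Finset.add_sum_erase _ _ hm]
  have hagree : ∀ x ∈ (Finset.range dct'.length).erase c.toNat,
      (if aget (pvSet start c v) (x : Int) = -1 then 1 + (pvGetL dct' (x : Int)).length else 0) =
      (if aget start (x : Int) = -1 then 1 + (pvGetL dct' (x : Int)).length else 0) := by
    intro x hx
    have hxne : x ≠ c.toNat := (Finset.mem_erase.mp hx).1
    rw [aget_pvSet_ne start c v x h0 (by positivity) (by omega)]
  rw [Finset.sum_congr rfl hagree]
  have hlen : c < (start.length : Int) := by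
    by_contra hcon
    have : start[c.toNat]? = none := by
      rw [List.getElem?_eq_none_iff]; omega
    simp [aget, this] at hc
  have hcval : aget (pvSet start c v) ((c.toNat : Int)) = v := by
    rw [hcast]; exact aget_pvSet_self start c v h0 hlen
  rw [hcval, hcast, hc]
  simp [hv]
  omega

-- ---------- sorted-adjacency bridge ----------

def sortAdj (dct : List (List Int)) : List (List Int) :=
  dct.map (fun l => PySem.List.sorted l (fun x => x) true)

theorem length_sortAdj (dct : List (List Int)) : (sortAdj dct).length = dct.length := by
  simp [sortAdj]

theorem pvGetL_sortAdj (dct : List (List Int)) (i : Int) (h0 : 0 ≤ i) (h1 : i < (dct.length : Int)) :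
    pvGetL (sortAdj dct) i = PySem.List.sorted (dct.getD i.toNat []) (fun x => x) true := by
  rw [pvGetL_nonneg _ _ h0]
  unfold sortAdj
  rw [List.getD_eq_getElem _ _ (by simp; omega), List.getD_eq_getElem _ _ (by omega)]
  simp

theorem mem_pvGetL_sortAdj (dct : List (List Int)) (i j : Int) (h0 : 0 ≤ i)
    (h1 : i < (dct.length : Int)) :
    j ∈ pvGetL (sortAdj dct) i ↔ j ∈ dct.getD i.toNat [] := by
  rw [pvGetL_sortAdj dct i h0 h1]
  exact PySem.List.mem_sorted _ _ _ _

theorem nodup_pvGetL_sortAdj (dct : List (List Int)) (i : Int) (h0 : 0 ≤ i)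
    (h1 : i < (dct.length : Int)) (hnd : (dct.getD i.toNat []).Nodup) :
    (pvGetL (sortAdj dct) i).Nodup := by
  rw [pvGetL_sortAdj dct i h0 h1]
  exact (List.Perm.nodup_iff (PySem.List.sorted_perm _ _ _)).mpr hnd

theorem length_pvGetL_sortAdj (dct : List (List Int)) (i : Int) (h0 : 0 ≤ i)
    (h1 : i < (dct.length : Int)) :
    (pvGetL (sortAdj dct) i).length = (dct.getD i.toNat []).length := by
  rw [pvGetL_sortAdj dct i h0 h1]
  exact PySem.List.length_sorted _ _ _

-- ---------- initial-state arithmetic ----------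

theorem aget_replicate (n : Nat) (v x : Int) (h0 : 0 ≤ x) (h1 : x < (n : Int)) :
    aget (List.replicate n v) x = v := by
  simp [aget]
  rw [List.getElem?_replicate_of_lt (by omega)]
  rfl

theorem foldl_add_length (l : List (List Int)) (s : Nat) :
    l.foldl (fun a x => a + x.length) s = s + (l.map List.length).sum := by
  induction l generalizing s with
  | nil => simp
  | cons a t ih => simp [ih]; omega

theorem sum_range_getD_length (l : List (List Int)) :
    ∑ x ∈ Finset.range l.length, (l.getD x []).length = (l.map List.length).sum := by
  induction l with
  | nil => simp
  | cons a t ih =>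
    rw [List.length_cons, Finset.sum_range_succ']
    simp only [List.getD_cons_succ, List.getD_cons_zero]
    rw [ih]
    simp [Nat.add_comm]

theorem unvis_init (dct : List (List Int)) :
    unvis (sortAdj dct) (List.replicate dct.length (-1)) =
      dct.length + dct.foldl (fun a l => a + l.length) 0 := by
  unfold unvis
  rw [length_sortAdj]
  have hcongr : ∀ x ∈ Finset.range dct.length,
      (if aget (List.replicate dct.length (-1)) (x : Int) = -1 then
        1 + (pvGetL (sortAdj dct) (x : Int)).length else 0) =
      1 + (dct.getD x []).length := by
    intro x hx
    have hxn : x < dct.length := Finset.mem_range.mp hx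
    rw [if_pos (aget_replicate _ _ _ (by positivity) (by exact_mod_cast hxn))]
    rw [length_pvGetL_sortAdj dct x (by positivity) (by exact_mod_cast hxn)]
    simp
  rw [Finset.sum_congr rfl hcongr, Finset.sum_add_distrib, sum_range_getD_length,
    foldl_add_length]
  simp

-- ---------- terminal state ----------

theorem terminal_eq (dct : List (List Int)) (root : Int) (start endA endB parent : List Int)
    (ch : List Int) (hso : StackOK dct root parent start [] ch)
    (hunv : ∀ x : Int, 0 ≤ x → x < (dct.length : Int) → aget start x = -1 →
        aget endA x = -1 ∧ aget endB x = -1)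
    (hcl : ∀ x : Int, 0 ≤ x → x < (dct.length : Int) → aget start x ≠ -1 → x ∉ ch →
        aget endA x = aget endB x)
    (hla : endA.length = dct.length) (hlb : endB.length = dct.length) : endA = endB := by
  cases hso
  apply aget_eq_of_agree _ _ (hla.trans hlb.symm)
  intro x h0 h1
  have hxn : x < (dct.length : Int) := by rw [hla] at h1; exact h1
  by_cases hx : aget start x = -1
  · obtain ⟨e1, e2⟩ := hunv x h0 hxn hx
    rw [e1, e2]
  · exact hcl x h0 hxn hx (by simp)

-- ---------- the visit step of the simulation ----------

theorem sim_visit (dct : List (List Int)) (root : Int)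
    (hpre : pvTreeSide dct root)
    (f : Nat) (order : Int) (start endA endB parent depth otn : List Int)
    (i fa : Int) (rest : List (Int × Int)) (ch : List Int)
    (hfa : (ch = [] ∧ i = root ∧ aget parent i = -1) ∨
           (∃ ch0, ch = fa :: ch0 ∧ parF dct root i = some fa ∧ aget parent i = fa))
    (hsub : StackOK dct root parent start rest ch)
    (hi : 0 ≤ i) (hin : i < (dct.length : Int)) (hstarti : aget start i = -1)
    (hpend : i ∉ pendNodes rest)
    (_hhead : ∀ v ch', ch = v :: ch' → aget endA v = order - 1)
    (hunv : ∀ x : Int, 0 ≤ x → x < (dct.length : Int) → aget start x = -1 →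
        aget endA x = -1 ∧ aget endB x = -1)
    (hcl : ∀ x : Int, 0 ≤ x → x < (dct.length : Int) → aget start x ≠ -1 → x ∉ ch →
        aget endA x = aget endB x)
    (hp3 : ∀ x : Int, 0 ≤ x → x < (dct.length : Int) → aget start x ≠ -1 → x ≠ root →
        ∃ q, parF dct root x = some q ∧ aget start q ≠ -1)
    (hls : start.length = dct.length) (hla : endA.length = dct.length)
    (hlb : endB.length = dct.length) (hlp : parent.length = dct.length)
    (hor : 0 ≤ order)
    (hbound : rest.length + 1 + unvis (sortAdj dct) start ≤ f + 1)
    (ihf : ∀ (order : Int) (start endA endB parent depth otn : List Int)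
      (stack : List (Int × Int)) (ch : List Int),
      StackOK dct root parent start stack ch →
      (∀ v ch', ch = v :: ch' → aget endA v = order - 1) →
      (∀ x : Int, 0 ≤ x → x < (dct.length : Int) → aget start x = -1 →
          aget endA x = -1 ∧ aget endB x = -1) →
      (∀ x : Int, 0 ≤ x → x < (dct.length : Int) → aget start x ≠ -1 → x ∉ ch →
          aget endA x = aget endB x) →
      (∀ x : Int, 0 ≤ x → x < (dct.length : Int) → aget start x ≠ -1 → x ≠ root →
          ∃ q, parF dct root x = some q ∧ aget start q ≠ -1) →
      start.length = dct.length → endA.length = dct.length → endB.length = dct.length →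
      parent.length = dct.length → 0 ≤ order →
      stack.length + unvis (sortAdj dct) start ≤ f →
      loopA (sortAdj dct) f order start endA parent depth otn stack =
        loopMid (sortAdj dct) f order start endB stack) :
    loopA (sortAdj dct) (f+1) order start endA parent depth otn ((i, fa) :: rest) =
      loopMid (sortAdj dct) (f+1) order start endB ((i, fa) :: rest) := by
  simp only [loopA, loopMid]
  rw [if_pos hi, if_pos hi]
  rw [foldA_third]
  rw [foldl_if_filter (pvGetL (sortAdj dct) i) fa
    (fun (st : List (Int × Int)) j => (j, i) :: st) ((-i-1, fa) :: rest)]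
  -- i is reachable
  have hti : ∃ t, pvDep dct root i = some t := by
    rcases hfa with ⟨_, hirt, _⟩ | ⟨ch0, _, hpf, _⟩
    · rw [hirt]; exact ⟨0, pvDep_root dct root⟩
    · obtain ⟨t, hdc, _, _⟩ := parF_some_elim dct root i fa hpf
      exact ⟨t+1, hdc⟩
  obtain ⟨ti, hti⟩ := hti
  -- facts about the pushed children
  have hnbrs : ∀ j ∈ pvGetL (sortAdj dct) i, 0 ≤ j ∧ j < (dct.length : Int) ∧ j ∈ dct.getD i.toNat [] := by
    intro j hj
    have hjo := (mem_pvGetL_sortAdj dct i j hi hin).mp hj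
    have hr := nbr_range dct root hpre i j ti hi hin hti hjo
    exact ⟨hr.1, hr.2, hjo⟩
  have hLparF : ∀ j ∈ (pvGetL (sortAdj dct) i).filter (fun j => j ≠ fa),
      parF dct root j = some i := by
    intro j hj
    obtain ⟨hj1, hj2⟩ := List.mem_filter.mp hj
    have hj2' : j ≠ fa := by simpa using hj2
    have hjo := (hnbrs j hj1).2.2
    rcases hfa with ⟨hch, hirt, hpar⟩ | ⟨ch0, hch, hpf, hpar⟩
    · rw [hirt]
      refine parF_of_root_nbr dct root hpre j ?_
      rw [pvGetL_nonneg dct root (hirt ▸ hi), ← hirt]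
      exact hjo
    · exact parF_of_nbr dct root hpre i fa j hi hin hpf
        (by rw [pvGetL_nonneg dct i hi]; exact hjo) hj2'
  have hLfacts : ∀ j ∈ (pvGetL (sortAdj dct) i).filter (fun j => j ≠ fa),
      0 ≤ j ∧ j < (dct.length : Int) ∧ aget start j = -1 ∧ j ≠ i := by
    intro j hj
    obtain ⟨hj1, _⟩ := List.mem_filter.mp hj
    have hr := hnbrs j hj1
    have hpj := hLparF j hj
    have hji : j ≠ i := parF_ne_self dct root j i hpj
    refine ⟨hr.1, hr.2.1, ?_, hji⟩
    by_contra hv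
    have hjrt : j ≠ root := parF_ne_root dct root j i hpj
    obtain ⟨q, hq1, hq2⟩ := hp3 j hr.1 hr.2.1 hv hjrt
    rw [hpj] at hq1
    injection hq1 with hq1
    rw [← hq1] at hq2
    exact hq2 hstarti
  have hiL : i ∉ (pvGetL (sortAdj dct) i).filter (fun j => j ≠ fa) :=
    fun h => (hLfacts i h).2.2.2 rfl
  have hplen : ∀ j ∈ pvGetL (sortAdj dct) i, 0 ≤ j ∧ j < (parent.length : Int) := by
    intro j hj
    have hr := hnbrs j hj
    rw [hlp]
    exact ⟨hr.1, hr.2.1⟩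
  have hparN : ∀ x : Int, 0 ≤ x →
      aget ((((pvGetL (sortAdj dct) i).foldl
        (fun (acc : List Int × List Int × List (Int × Int)) j =>
          if j ≠ fa then (pvSet acc.1 j i, pvSet acc.2.1 j (pvGet acc.2.1 i + 1), (j, i) :: acc.2.2)
          else acc) (parent, depth, (-i-1, fa) :: rest))).1) x =
      if x ∈ (pvGetL (sortAdj dct) i).filter (fun j => j ≠ fa) then i else aget parent x :=
    fun x hx => foldA_first_aget (pvGetL (sortAdj dct) i) fa i parent depth _ hplen x hx
  have hchm := stackok_chain_mem hsub
  have hchp := stackok_chain_parvis hsub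
  have hpendf := stackok_pend hsub
  have hnotL : ∀ x, (x ∈ ch ∨ x ∈ pendNodes rest) →
      x ∉ (pvGetL (sortAdj dct) i).filter (fun j => j ≠ fa) := by
    intro x hx hxl
    have hpx := hLparF x hxl
    have contra : ∀ q, parF dct root x = some q → aget start q ≠ -1 → False := by
      intro q hq1 hq2
      rw [hpx] at hq1
      injection hq1 with hq1
      rw [← hq1] at hq2
      exact hq2 hstarti
    rcases hx with hxc | hxp
    · rcases hchp x hxc with hxr | ⟨q, hq1, hq2⟩
      · rw [hxr, parF_root] at hpx; cases hpx
      · exact contra q hq1 hq2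
    · obtain ⟨_, _, _, hrr⟩ := hpendf x hxp
      rcases hrr with hxr | ⟨q, hq1, hq2⟩
      · rw [hxr, parF_root] at hpx; cases hpx
      · exact contra q hq1 hq2
  have hnoti : ∀ x, (x ∈ ch ∨ x ∈ pendNodes rest) → x ≠ i := by
    intro x hx he
    subst he
    rcases hx with hxc | hxp
    · exact (hchm x hxc).2.2 hstarti
    · exact hpend hxp
  have hstartN_i : aget (pvSet start i order) i = order :=
    aget_pvSet_self start i order hi (by rw [hls]; exact hin)
  have hsubN : StackOK dct root (((pvGetL (sortAdj dct) i).foldl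
      (fun (acc : List Int × List Int × List (Int × Int)) j =>
        if j ≠ fa then (pvSet acc.1 j i, pvSet acc.2.1 j (pvGet acc.2.1 i + 1), (j, i) :: acc.2.2)
        else acc) (parent, depth, (-i-1, fa) :: rest)).1) (pvSet start i order) rest ch := by
    apply stackok_congr hsub
    · intro x hx
      have hx0 : 0 ≤ x := (hchm x hx).1
      refine ⟨?_, ?_⟩
      · rw [hparN x hx0, if_neg (hnotL x (Or.inl hx))]
      · exact aget_pvSet_ne start i order x hi hx0 (fun he => hnoti x (Or.inl hx) he.symm)
    · intro x hx
      have hx0 : 0 ≤ x := (hpendf x hx).1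
      refine ⟨?_, ?_⟩
      · rw [hparN x hx0, if_neg (hnotL x (Or.inr hx))]
      · exact aget_pvSet_ne start i order x hi hx0 (fun he => hnoti x (Or.inr hx) he.symm)
  have hsent : StackOK dct root (((pvGetL (sortAdj dct) i).foldl
      (fun (acc : List Int × List Int × List (Int × Int)) j =>
        if j ≠ fa then (pvSet acc.1 j i, pvSet acc.2.1 j (pvGet acc.2.1 i + 1), (j, i) :: acc.2.2)
        else acc) (parent, depth, (-i-1, fa) :: rest)).1) (pvSet start i order)
      ((-i-1, fa) :: rest) (i :: ch) := by
    refine StackOK.sent i fa hsubN hi hin (by rw [hstartN_i]; omega) ?_ ?_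
    · intro hch
      rcases hfa with ⟨_, hirt, hpar⟩ | ⟨ch0, hch0, _, _⟩
      · exact ⟨hirt, by rw [hparN i hi, if_neg hiL]; exact hpar⟩
      · rw [hch0] at hch; cases hch
    · intro p ch' hch
      rcases hfa with ⟨hchn, _, _⟩ | ⟨ch0, hch0, hpf, hpar⟩
      · rw [hchn] at hch; cases hch
      · rw [hch0] at hch
        injection hch with e1 e2
        subst e1
        exact ⟨hpf, by rw [hparN i hi, if_neg hiL]; exact hpar⟩
  have hnd : ((pvGetL (sortAdj dct) i).filter (fun j => j ≠ fa)).Nodup :=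
    List.Nodup.filter _ (nodup_pvGetL_sortAdj dct i hi hin (nbr_nodup dct root hpre i ti hi hin hti))
  have hstackN := stackok_push (dct := dct) (root := root) i
    ((pvGetL (sortAdj dct) i).filter (fun j => j ≠ fa)) ((-i-1, fa) :: rest) hsent (by
      intro j hj
      have h1 := hLfacts j hj
      refine ⟨h1.1, h1.2.1, ?_, hLparF j hj, ?_, ?_⟩
      · rw [aget_pvSet_ne start i order j hi h1.1 (fun he => h1.2.2.2 he.symm)]
        exact h1.2.2.1
      · rw [hparN j h1.1, if_pos hj]
      · rw [pendNodes_cons_neg _ _ _ (by omega)]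
        intro hc
        exact hnotL j (Or.inr hc) hj) hnd
  -- apply the induction hypothesis
  apply ihf (order + 1) (pvSet start i order) (pvSet endA i order) endB _ _ (pvSet otn order i)
    _ (i :: ch) hstackN
  · intro v ch' h
    injection h with e1 e2
    rw [← e1, aget_pvSet_self endA i order hi (by rw [hla]; exact hin)]
    omega
  · intro x h0 h1 hx
    have hxi : x ≠ i := by
      intro he
      rw [he, hstartN_i] at hx
      omega
    rw [aget_pvSet_ne start i order x hi h0 (fun he => hxi he.symm)] at hx
    refine ⟨?_, (hunv x h0 h1 hx).2⟩
    rw [aget_pvSet_ne endA i order x hi h0 (fun he => hxi he.symm)]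
    exact (hunv x h0 h1 hx).1
  · intro x h0 h1 hx hxch
    have hxi : x ≠ i := fun he => hxch (he ▸ List.mem_cons_self ..)
    rw [aget_pvSet_ne start i order x hi h0 (fun he => hxi he.symm)] at hx
    rw [aget_pvSet_ne endA i order x hi h0 (fun he => hxi he.symm)]
    exact hcl x h0 h1 hx (fun hc => hxch (List.mem_cons_of_mem _ hc))
  · intro x h0 h1 hx hxr
    by_cases hxi : x = i
    · subst hxi
      rcases hfa with ⟨_, hirt, _⟩ | ⟨ch0, hch0, hpf, _⟩
      · exact absurd hirt hxr
      · refine ⟨fa, hpf, ?_⟩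
        have hfam := hchm fa (hch0 ▸ List.mem_cons_self ..)
        have hfai : fa ≠ x := fun he => hfam.2.2 (he ▸ hstarti)
        rw [aget_pvSet_ne start x order fa hi hfam.1 (fun he => hfai he.symm)]
        exact hfam.2.2
    · have hx' : aget start x ≠ -1 := by
        rwa [aget_pvSet_ne start i order x hi h0 (fun he => hxi he.symm)] at hx
      obtain ⟨q, hq1, hq2⟩ := hp3 x h0 h1 hx' hxr
      refine ⟨q, hq1, ?_⟩
      by_cases hqi : q = i
      · rw [hqi, hstartN_i]; omega
      · obtain ⟨t, hdx, hqm, _⟩ := parF_some_elim dct root x q hq1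
        rw [pvGetL_nonneg dct x h0] at hqm
        have hqr := nbr_range dct root hpre x q (t+1) h0 h1 hdx hqm
        rw [aget_pvSet_ne start i order q hi hqr.1 (fun he => hqi he.symm)]
        exact hq2
  · rw [length_pvSet]; exact hls
  · rw [length_pvSet]; exact hla
  · exact hlb
  · rw [foldA_first_length]; exact hlp
  · omega
  · rw [foldl_push_length]
    have hstep := unvis_step (sortAdj dct) start i order hi
      (by rw [length_sortAdj]; exact hin) hstarti (by omega)
    have hfl : ((pvGetL (sortAdj dct) i).filter (fun j => j ≠ fa)).length ≤
        (pvGetL (sortAdj dct) i).length := List.length_filter_le _ _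
    simp only [List.length_cons]
    omega

-- ---------- the simulation ----------

theorem sim (dct : List (List Int)) (root : Int)
    (hpre : pvTreeSide dct root) :
    ∀ (fuel : Nat) (order : Int) (start endA endB parent depth otn : List Int)
      (stack : List (Int × Int)) (ch : List Int),
      StackOK dct root parent start stack ch →
      (∀ v ch', ch = v :: ch' → aget endA v = order - 1) →
      (∀ x : Int, 0 ≤ x → x < (dct.length : Int) → aget start x = -1 →
          aget endA x = -1 ∧ aget endB x = -1) →
      (∀ x : Int, 0 ≤ x → x < (dct.length : Int) → aget start x ≠ -1 → x ∉ ch →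
          aget endA x = aget endB x) →
      (∀ x : Int, 0 ≤ x → x < (dct.length : Int) → aget start x ≠ -1 → x ≠ root →
          ∃ q, parF dct root x = some q ∧ aget start q ≠ -1) →
      start.length = dct.length → endA.length = dct.length → endB.length = dct.length →
      parent.length = dct.length → 0 ≤ order →
      stack.length + unvis (sortAdj dct) start ≤ fuel →
      loopA (sortAdj dct) fuel order start endA parent depth otn stack =
        loopMid (sortAdj dct) fuel order start endB stack := by
  intro fuel
  induction fuel with
  | zero =>
    intro order start endA endB parent depth otn stack ch hso hhead hunv hcl hp3 hls hla hlb hlp hor hbound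
    have hstack : stack = [] := List.length_eq_zero_iff.mp (by omega)
    subst hstack
    show (start, endA) = (start, endB)
    rw [terminal_eq dct root start endA endB parent ch hso hunv hcl hla hlb]
  | succ f ihf =>
    intro order start endA endB parent depth otn stack ch hso hhead hunv hcl hp3 hls hla hlb hlp hor hbound
    match stack, hso, hbound with
    | [], hso, hbound =>
      show (start, endA) = (start, endB)
      rw [terminal_eq dct root start endA endB parent ch hso hunv hcl hla hlb]
    | (i, fa) :: rest, hso, hbound =>
      by_cases hi : 0 ≤ i
      · -- ===== visit step =====
        cases hso with
        | sent v f' hsub h1 h2 h3 hnil hcons => exact absurd hi (by omega)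
        | init hr0 hr1 hsr hpr =>
          exact sim_visit dct root hpre f order start endA endB parent depth otn root (-1) [] []
            (Or.inl ⟨rfl, rfl, hpr⟩) StackOK.base hi hr1 hsr (by simp [pendNodes_nil])
            hhead hunv hcl hp3 hls hla hlb hlp hor (by simpa using hbound) ihf
        | child v c hsub hc0 hc1 hc2 hc3 hc4 hc5 =>
          exact sim_visit dct root hpre f order start endA endB parent depth otn i fa rest _
            (Or.inr ⟨_, rfl, hc3, hc4⟩) hsub hi hc1 hc2 hc5
            hhead hunv hcl hp3 hls hla hlb hlp hor (by simpa using hbound) ihf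
      · -- ===== sentinel step =====
        cases hso with
        | init hr0 hr1 hsr hpr => exact absurd hr0 hi
        | child v c hsub hc0 hc1 hc2 hc3 hc4 hc5 => exact absurd hc0 hi
        | sent v f' hsub h1 h2 h3 hnil hcons =>
          simp only [loopA, loopMid]
          rw [if_neg hi, if_neg hi]
          have hveq : (-(-v-1)-1 : Int) = v := by ring
          rw [hveq]
          rw [pvGet_eq_aget parent v h1]
          have hlaN : v < (endA.length : Int) := by rw [hla]; exact h2
          have hlbN : v < (endB.length : Int) := by rw [hlb]; exact h2
          cases hch0 : ‹List Int› with
          | nil =>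
            subst hch0
            obtain ⟨hvr, hpv⟩ := hnil rfl
            rw [hpv, if_neg (by simp)]
            apply ihf order start endA (pvSet endB v (order - 1)) parent depth otn rest []
              hsub
            · intro v' ch'' h; cases h
            · intro x h0 h1' hx
              have hxv : x ≠ v := fun he => h3 (he ▸ hx)
              refine ⟨(hunv x h0 h1' hx).1, ?_⟩
              rw [aget_pvSet_ne endB v (order-1) x h1 h0 (fun he => hxv he.symm)]
              exact (hunv x h0 h1' hx).2
            · intro x h0 h1' hx _
              by_cases hxv : x = v
              · subst hxv
                rw [aget_pvSet_self endB x (order-1) h1 hlbN]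
                exact hhead x [] rfl
              · rw [aget_pvSet_ne endB v (order-1) x h1 h0 (fun he => hxv he.symm)]
                exact hcl x h0 h1' hx (by simp [hxv])
            · exact hp3
            · exact hls
            · exact hla
            · rw [length_pvSet]; exact hlb
            · exact hlp
            · exact hor
            · have := hbound; simp at this ⊢; omega
          | cons p ch0' =>
            subst hch0
            obtain ⟨hpf, hpv⟩ := hcons p ch0' rfl
            have hpmem := stackok_chain_mem hsub p (List.mem_cons_self ..)
            have hvp : v ≠ p := parF_ne_self dct root v p hpf
            rw [hpv, if_pos (show (p : Int) ≠ -1 by omega)]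
            rw [pvGet_eq_aget endA v h1, hhead v _ rfl]
            have hlaP : p < (endA.length : Int) := by rw [hla]; exact hpmem.2.1
            apply ihf order start (pvSet endA p (order - 1)) (pvSet endB v (order - 1)) parent
              depth otn rest (p :: ch0') hsub
            · intro v' ch'' h
              cases h
              rw [aget_pvSet_self endA p (order-1) hpmem.1 hlaP]
            · intro x h0 h1' hx
              have hxv : x ≠ v := fun he => h3 (he ▸ hx)
              have hxp : x ≠ p := fun he => hpmem.2.2 (he ▸ hx)
              rw [aget_pvSet_ne endA p (order-1) x hpmem.1 h0 (fun he => hxp he.symm),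
                aget_pvSet_ne endB v (order-1) x h1 h0 (fun he => hxv he.symm)]
              exact hunv x h0 h1' hx
            · intro x h0 h1' hx hxch
              have hxp : x ≠ p := fun he => hxch (he ▸ List.mem_cons_self ..)
              rw [aget_pvSet_ne endA p (order-1) x hpmem.1 h0 (fun he => hxp he.symm)]
              by_cases hxv : x = v
              · subst hxv
                rw [aget_pvSet_self endB x (order-1) h1 hlbN]
                exact hhead x _ rfl
              · rw [aget_pvSet_ne endB v (order-1) x h1 h0 (fun he => hxv he.symm)]
                exact hcl x h0 h1' hx (by
                  intro hc
                  rcases List.mem_cons.mp hc with h | h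
                  · exact hxv h
                  · exact hxch h)
            · exact hp3
            · exact hls
            · rw [length_pvSet]; exact hla
            · rw [length_pvSet]; exact hlb
            · exact hlp
            · exact hor
            · have := hbound; simp at this ⊢; omega

-- ---------- empty-stack evaluations ----------

theorem loopA_nil (dct : List (List Int)) (f : Nat) (o : Int) (s e p d t : List Int) :
    loopA dct f o s e p d t [] = (s, e) := by cases f <;> rfl

theorem loopMid_nil (dct : List (List Int)) (f : Nat) (o : Int) (s e : List Int) :
    loopMid dct f o s e [] = (s, e) := by cases f <;> rfl

theorem set_replicate_self' (n k : Nat) : (List.replicate n (-1 : Int)).set k (-1) = List.replicate n (-1) := by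
  induction n generalizing k with
  | zero => rfl
  | succ m ih =>
    cases k with
    | zero => simp [List.replicate_succ]
    | succ k' => simp [List.replicate_succ, ih]

-- ===== VERDICT (by name: the statement is the Claim_ definition above) =====
theorem gen_bfs_order_iteration_spec : Claim_equal_gen_bfs_order_iteration := by
  intro dct root _ hpre
  unfold Spec_gen_bfs_order_iteration
  simp only [gen_bfs_order_iteration, gen_bfs_order_iteration_alt]
  rw [show dct.map (fun l => PySem.List.sorted l (fun x => x) true) = sortAdj dct from rfl]
  rw [show dct.length + ((dct.map List.length).sum + 1) =
      1 + dct.length + dct.foldl (fun a l => a + l.length) 0 by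
    rw [foldl_add_length]; omega]
  rw [mid_eq_replay]
  rcases hpre with ⟨hn0, hn1⟩ | hpre
  · -- negative root: the single frame pops as an exit marker, both sides leave the arrays alone
    rw [show 1 + dct.length + dct.foldl (fun a l => a + l.length) 0 =
        (dct.length + dct.foldl (fun a l => a + l.length) 0) + 1 by omega]
    have hnr : ¬ (0 ≤ root) := by omega
    simp only [loopA, loopMid]
    rw [if_neg hnr, if_neg hnr]
    rw [pvGet_eq_aget _ _ (by omega : (0:Int) ≤ -root-1),
      aget_replicate _ _ _ (by omega) hn1]
    rw [if_neg (by simp)]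
    rw [loopA_nil, loopMid_nil]
    rw [show (0:Int) - 1 = -1 by ring]
    rw [pvSet_eq_set _ _ _ (by omega) (by simpa using hn1), set_replicate_self']
  · obtain ⟨hr0, hr1⟩ := pre_root_range dct root hpre
    apply sim dct root hpre _ 0 _ _ _ _ _ _ [(root, -1)] []
    · exact StackOK.init hr0 hr1 (aget_replicate _ _ _ hr0 hr1) (aget_replicate _ _ _ hr0 hr1)
    · intro v ch' h; cases h
    · intro x h0 h1 _
      exact ⟨aget_replicate _ _ _ h0 h1, aget_replicate _ _ _ h0 h1⟩
    · intro x h0 h1 hx _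
      exact absurd (aget_replicate _ _ _ h0 h1) hx
    · intro x h0 h1 hx _
      exact absurd (aget_replicate _ _ _ h0 h1) hx
    · simp
    · simp
    · simp
    · simp
    · exact le_refl 0
    · rw [unvis_init]
      simp
      omega
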